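-- pv_equiv track=rewrite | github.com/Alfanous-team/alfanous | src/interfaces/mobile/Nokia S60/dev-envirement/epoc32/winscw/c/resource/ntpath.py | splitext
-- ===== SOURCE A (Python) =====
-- def splitext(p):
--     root, ext = '', ''
--     for c in p:
--         if c in ['/','\\']:
--             root, ext = root + ext + c, ''
--         elif c == '.':
--             if ext:
--                 root, ext = root + ext, c
--             else:
--                 ext = c
--         elif ext:
--             ext = ext + c
--         else:
--             root = root + c
--     return root, ext
-- ===== SOURCE B (Python) =====
-- def splitext(p):
--     d = p.rfind('.')
--     s = max(p.rfind('/'), p.rfind('\\'))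
--     if d > s:
--         return p[:d], p[d:]
--     return p, ''
-- ===== Notes on version B (the rewrite author's own statement) =====
-- stated objective: idiomatic
-- what changed: Replaces A's character-by-character state-machine loop that accumulates root/ext by repeated string concatenation with two rfind position searches (last dot vs last separator) and a single slice.
import Mathlib
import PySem

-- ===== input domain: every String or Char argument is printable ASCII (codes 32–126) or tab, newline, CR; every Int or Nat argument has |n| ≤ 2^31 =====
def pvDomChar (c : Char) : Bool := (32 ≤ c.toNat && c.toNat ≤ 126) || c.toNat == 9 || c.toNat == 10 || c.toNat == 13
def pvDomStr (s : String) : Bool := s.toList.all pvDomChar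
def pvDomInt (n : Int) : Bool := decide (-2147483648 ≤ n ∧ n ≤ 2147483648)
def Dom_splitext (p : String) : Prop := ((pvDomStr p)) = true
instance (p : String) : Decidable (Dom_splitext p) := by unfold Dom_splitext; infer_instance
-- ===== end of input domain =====

-- B replaces A's character-by-character state-machine accumulation with two library rfind
-- position searches and a single slice (objective: idiomatic).

-- ===== PORT A =====
-- A's loop body: state (root, ext) as lists of characters, branches in Python order.
def pvStep (st : List Char × List Char) (c : Char) : List Char × List Char :=
  if c = '/' ∨ c = '\\' then ((st.1 ++ st.2) ++ [c], [])
  else if c = '.' then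
    if st.2 ≠ [] then (st.1 ++ st.2, [c]) else (st.1, [c])
  else if st.2 ≠ [] then (st.1, st.2 ++ [c])
  else (st.1 ++ [c], st.2)

def splitext (p : String) : String × String :=
  let r := p.toList.foldl pvStep ([], [])
  (String.ofList r.1, String.ofList r.2)

-- ===== PORT B =====
def splitext_alt (p : String) : String × String :=
  let d := PySem.Str.rfind p "."
  let s := max (PySem.Str.rfind p "/") (PySem.Str.rfind p "\\")
  if s < d then
    (String.ofList (PySem.List.slice p.toList none (some d)),
     String.ofList (PySem.List.slice p.toList (some d) none))
  else (p, "")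

-- ===== PRECONDITION & SPEC =====
def Spec_splitext (p : String) (out : String × String) : Prop := out = splitext_alt p
instance (p : String) (out : String × String) : Decidable (Spec_splitext p out) := by unfold Spec_splitext; infer_instance

-- ===== CLAIM (what is proved, stated in full; the proofs are below) =====
def Claim_equal_splitext : Prop := ∀ (p : String), Dom_splitext p → Spec_splitext p (splitext p)

-- ===== LEMMAS AND PROOFS =====

lemma pvGoZero (s sub : List Char) :
    PySem.Chars.rfind.go s sub 0 = if sub.isPrefixOf s then 0 else -1 := rfl

lemma pvGoSucc (s sub : List Char) (j : Nat) :
    PySem.Chars.rfind.go s sub (j + 1)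
      = if sub.isPrefixOf (s.drop (j + 1)) then ((j : Int) + 1) else PySem.Chars.rfind.go s sub j := rfl

lemma pvGoBounds (s sub : List Char) (n : Nat) :
    -1 ≤ PySem.Chars.rfind.go s sub n ∧ PySem.Chars.rfind.go s sub n ≤ (n : Int) := by
  induction n with
  | zero => rw [pvGoZero]; split <;> omega
  | succ j ih =>
    rw [pvGoSucc]; split
    · constructor <;> push_cast <;> omega
    · obtain ⟨h1, h2⟩ := ih; constructor <;> push_cast <;> omega

lemma pvRfindGe (s sub : List Char) : -1 ≤ PySem.Chars.rfind s sub := by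
  unfold PySem.Chars.rfind; exact (pvGoBounds s sub s.length).1

lemma pvRfindLt (s : List Char) (ch : Char) :
    PySem.Chars.rfind s [ch] < (s.length : Int) := by
  unfold PySem.Chars.rfind
  cases hn : s.length with
  | zero =>
    have hs : s = [] := List.length_eq_zero_iff.mp hn
    subst hs
    simp [pvGoZero, List.isPrefixOf]
  | succ m =>
    rw [pvGoSucc]
    have hdrop : s.drop (m + 1) = [] := by rw [← hn]; exact List.drop_length
    rw [hdrop]
    simp only [List.isPrefixOf, Bool.false_eq_true, if_false]
    have := (pvGoBounds s [ch] m).2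
    push_cast
    omega

lemma pvGoAppend (s : List Char) (c ch : Char) (n : Nat) (hn : n < s.length) :
    PySem.Chars.rfind.go (s ++ [c]) [ch] n = PySem.Chars.rfind.go s [ch] n := by
  induction n with
  | zero =>
    rw [pvGoZero, pvGoZero]
    cases s with
    | nil => simp at hn
    | cons a t => simp [List.isPrefixOf]
  | succ j ih =>
    have hd : s.drop (j + 1) = s[j + 1] :: s.drop (j + 2) := List.drop_eq_getElem_cons hn
    have hd2 : (s ++ [c]).drop (j + 1) = s.drop (j + 1) ++ [c] :=
      List.drop_append_of_le_length (by omega)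
    rw [pvGoSucc, pvGoSucc, hd2, hd]
    simp only [List.cons_append, List.isPrefixOf, Bool.and_true, List.isPrefixOf]
    by_cases h : ch = s[j + 1]
    · simp [h]
    · simp [h, ih (by omega)]

lemma pvRfindAppend (s : List Char) (c ch : Char) :
    PySem.Chars.rfind (s ++ [c]) [ch]
      = if c = ch then (s.length : Int) else PySem.Chars.rfind s [ch] := by
  unfold PySem.Chars.rfind
  have hlen : (s ++ [c]).length = s.length + 1 := by simp
  rw [hlen, pvGoSucc]
  have hdrop : (s ++ [c]).drop (s.length + 1) = [] := by
    rw [← hlen]; exact List.drop_length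
  rw [hdrop]
  simp only [List.isPrefixOf, Bool.false_eq_true, if_false]
  cases hs : s.length with
  | zero =>
    have hnil : s = [] := List.length_eq_zero_iff.mp hs
    subst hnil
    simp only [List.nil_append, pvGoZero, List.isPrefixOf, Bool.and_true]
    by_cases h : c = ch
    · subst h; simp
    · have h' : ¬ ch = c := fun hh => h hh.symm
      simp [h, h']
  | succ m =>
    rw [pvGoSucc, pvGoSucc]
    have h1 : (s ++ [c]).drop (m + 1) = [c] := by
      rw [show m + 1 = s.length from hs.symm]; exact List.drop_left
    have h2 : s.drop (m + 1) = [] := by rw [← hs]; exact List.drop_length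
    rw [h1, h2]
    simp only [List.isPrefixOf, Bool.and_true, Bool.false_eq_true, if_false]
    by_cases h : c = ch
    · subst h; simp
    · have h' : ¬ ch = c := fun hh => h hh.symm
      simp [h, h', pvGoAppend s c ch m (by omega)]

-- B's computation at the level of character lists (proof-side helper).
def pvAlt (cs : List Char) : List Char × List Char :=
  let d := PySem.Chars.rfind cs ['.']
  let s := max (PySem.Chars.rfind cs ['/']) (PySem.Chars.rfind cs ['\\'])
  if s < d then (cs.take d.toNat, cs.drop d.toNat) else (cs, [])

lemma pvFoldEq (cs : List Char) : cs.foldl pvStep ([], []) = pvAlt cs := by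
  induction cs using List.reverseRecOn with
  | nil => decide
  | append_singleton s c ih =>
    rw [List.foldl_append]
    simp only [List.foldl_cons, List.foldl_nil, ih]
    have hd := pvRfindLt s '.'
    have h1 := pvRfindLt s '/'
    have h2 := pvRfindLt s '\\'
    have hg := pvRfindGe s ['.']
    have hg1 := pvRfindGe s ['/']
    have hg2 := pvRfindGe s ['\\']
    set D := PySem.Chars.rfind s ['.'] with hD
    set S1 := PySem.Chars.rfind s ['/'] with hS1
    set S2 := PySem.Chars.rfind s ['\\'] with hS2
    simp only [pvAlt, pvRfindAppend, ← hD, ← hS1, ← hS2]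
    by_cases hc1 : c = '/'
    · subst hc1
      simp only [Char.reduceEq, reduceIte]
      rw [if_neg (by omega : ¬ max (s.length : Int) S2 < D)]
      by_cases hP : max S1 S2 < D
      · rw [if_pos hP]
        simp [pvStep, List.take_append_drop]
      · rw [if_neg hP]
        simp [pvStep]
    · by_cases hc2 : c = '\\'
      · subst hc2
        simp only [Char.reduceEq, reduceIte]
        rw [if_neg (by omega : ¬ max S1 (s.length : Int) < D)]
        by_cases hP : max S1 S2 < D
        · rw [if_pos hP]
          simp [pvStep, List.take_append_drop]
        · rw [if_neg hP]
          simp [pvStep]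
      · by_cases hc3 : c = '.'
        · subst hc3
          simp only [Char.reduceEq, reduceIte]
          rw [if_pos (by omega : max S1 S2 < (s.length : Int))]
          have htn : ((s.length : Int)).toNat = s.length := by omega
          rw [htn]
          have htake : (s ++ ['.']).take s.length = s := List.take_left
          have hdrop : (s ++ ['.']).drop s.length = ['.'] := List.drop_left
          rw [htake, hdrop]
          by_cases hP : max S1 S2 < D
          · rw [if_pos hP]
            simp only [pvStep, if_neg (by decide : ¬ ('.' = '/' ∨ '.' = '\\'))]
            by_cases he : s.drop D.toNat = []
            · have : s.take D.toNat = s := by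
                have h := List.take_append_drop D.toNat s
                rw [he, List.append_nil] at h; exact h
              simp [he, this]
            · simp [he, List.take_append_drop]
          · rw [if_neg hP]
            simp [pvStep]
        · simp only [if_neg hc1, if_neg hc2, if_neg hc3]
          by_cases hP : max S1 S2 < D
          · rw [if_pos hP, if_pos hP]
            have hD0 : 0 ≤ D := by omega
            have hDn : D.toNat < s.length := by omega
            have he : s.drop D.toNat ≠ [] := by
              rw [Ne, List.drop_eq_nil_iff]; omega
            have htake : (s ++ [c]).take D.toNat = s.take D.toNat :=
              List.take_append_of_le_length (by omega)
            have hdrop : (s ++ [c]).drop D.toNat = s.drop D.toNat ++ [c] :=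
              List.drop_append_of_le_length (by omega)
            rw [htake, hdrop]
            simp [pvStep, hc1, hc2, hc3, he]
          · rw [if_neg hP, if_neg hP]
            simp [pvStep, hc1, hc2, hc3]

lemma pvAltEq (p : String) :
    splitext_alt p = (String.ofList (pvAlt p.toList).1, String.ofList (pvAlt p.toList).2) := by
  unfold splitext_alt pvAlt
  have hdot : ("." : String).toList = ['.'] := by decide
  have hsl : ("/" : String).toList = ['/'] := by decide
  have hbs : ("\\" : String).toList = ['\\'] := by decide
  simp only [PySem.Str.rfind, hdot, hsl, hbs]
  by_cases hP : max (PySem.Chars.rfind p.toList ['/']) (PySem.Chars.rfind p.toList ['\\'])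
      < PySem.Chars.rfind p.toList ['.']
  · rw [if_pos hP, if_pos hP]
    have h0 : 0 ≤ PySem.Chars.rfind p.toList ['.'] := by
      have := pvRfindGe p.toList ['/']
      have := pvRfindGe p.toList ['\\']
      omega
    rw [PySem.List.slice_to _ h0, PySem.List.slice_from _ h0]
  · rw [if_neg hP, if_neg hP]
    simp

-- ===== VERDICT (by name: the statement is the Claim_ definition above) =====
theorem splitext_spec : Claim_equal_splitext := by
  intro p _
  unfold Spec_splitext
  rw [pvAltEq]
  unfold splitext
  rw [pvFoldEq]
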